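-- pv_equiv track=rewrite | github.com/hongxing1986/- | pattern_library_v2.py | s5
-- ===== SOURCE A (Python) =====
-- from collections import Counter, defaultdict
--
-- def s5(train):  # 近5热+在上期
--     last = set(train[-1]['zs'])
--     c = Counter()
--     for d in train[-5:]: c.update(d['zs'])
--     for z,_ in c.most_common():
--         if z in last:
--             return z
--     return c.most_common(1)[0][0]
-- ===== SOURCE B (Python) =====
-- from collections import Counter
--
-- def s5(train):  # 近5热+在上期: one direct argmax pass instead of sorting via most_common()
--     last = set(train[-1]['zs'])
--     c = Counter()
--     for d in train[-5:]:
--         c.update(d['zs'])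
--     best = None       # hottest (key, cnt) among keys in last; strict > keeps earliest-inserted on ties
--     best_all = None   # hottest (key, cnt) overall (same tie rule as most_common(1))
--     for z, cnt in c.items():
--         if z in last and (best is None or cnt > best[1]):
--             best = (z, cnt)
--         if best_all is None or cnt > best_all[1]:
--             best_all = (z, cnt)
--     if best is not None:
--         return best[0]
--     return best_all[0]
-- ===== Notes on version B (the rewrite author's own statement) =====
-- stated objective: alternative
-- what changed: B replaces A's sort of the counter items via most_common() plus linear scans by a single argmax pass over c.items() in insertion order (strict > reproduces most_common's stable tie-break), tracking both the hottest key present in the last draw and the hottest key overall.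
import Mathlib
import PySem

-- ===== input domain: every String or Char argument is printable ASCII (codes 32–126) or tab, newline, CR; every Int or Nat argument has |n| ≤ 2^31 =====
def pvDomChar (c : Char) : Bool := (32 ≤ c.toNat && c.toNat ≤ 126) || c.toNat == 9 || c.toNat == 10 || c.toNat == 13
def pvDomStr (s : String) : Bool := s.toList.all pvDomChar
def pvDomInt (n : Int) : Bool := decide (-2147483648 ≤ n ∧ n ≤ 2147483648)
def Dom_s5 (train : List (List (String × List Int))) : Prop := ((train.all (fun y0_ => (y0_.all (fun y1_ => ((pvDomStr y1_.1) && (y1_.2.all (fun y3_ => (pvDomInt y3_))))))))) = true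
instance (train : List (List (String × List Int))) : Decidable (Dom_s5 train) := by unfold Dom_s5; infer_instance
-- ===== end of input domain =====

-- B replaces A's sort-then-scan over most_common() by one direct argmax pass over the counter's
-- items (strict > keeps the earliest-inserted key on ties, exactly most_common's stable order).

-- shared helpers: both Pythons compute `last` and the 5-draw Counter by the same lines
def pvLast (train : List (List (String × List Int))) : PySem.Set Int :=
  PySem.Set.ofList ((PySem.Dict.mk (PySem.List.pyGetD train (-1) [])).getD "zs" [])

def pvCounter (train : List (List (String × List Int))) : PySem.Dict Int Int :=
  (PySem.List.slice train (some (-5)) none).foldl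
    (fun c d => ((PySem.Dict.mk d).getD "zs" []).foldl (fun c x => c.modify x 0 (· + 1)) c)
    PySem.Dict.empty

-- ===== PORT A =====
def s5 (train : List (List (String × List Int))) : Int :=
  let last := pvLast train
  let c := pvCounter train
  let mc := PySem.List.sorted c.items (fun p => p.2) true   -- c.most_common()
  match mc.find? (fun p => PySem.Set.contains last p.1) with -- for z,_ in mc: if z in last: return z
  | some p => p.1
  | none =>
    match mc with                                            -- c.most_common(1)[0][0] (head of the same sorted order)
    | p :: _ => p.1
    | [] => 0                                                -- IndexError in Python; excluded by Pre_s5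

-- ===== PORT B =====
def pvStep (acc : Option (Int × Int)) (p : Int × Int) : Option (Int × Int) :=
  match acc with
  | none => some p
  | some q => if p.2 > q.2 then some p else some q

def s5_alt (train : List (List (String × List Int))) : Int :=
  let last := pvLast train
  let c := pvCounter train
  let r := c.items.foldl
    (fun st p => (if PySem.Set.contains last p.1 then pvStep st.1 p else st.1, pvStep st.2 p))
    (none, none)
  match r with
  | (some q, _) => q.1
  | (none, some q) => q.1
  | (none, none) => 0                                        -- B's Python has best = best_all = None here (c empty); excluded by Pre_s5

-- ===== PRECONDITION & SPEC =====
-- Pre_ excludes exactly the inputs where Python A raises: empty train (IndexError on train[-1]),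
-- a last-5 draw without the 'zs' key (KeyError), and an empty counter (IndexError on most_common(1)[0]).
def Pre_s5 (train : List (List (String × List Int))) : Prop :=
  train ≠ [] ∧
  (∀ d ∈ PySem.List.slice train (some (-5)) none, (PySem.Dict.mk d).contains "zs" = true) ∧
  (∃ d ∈ PySem.List.slice train (some (-5)) none, (PySem.Dict.mk d).getD "zs" [] ≠ [])
instance (train : List (List (String × List Int))) : Decidable (Pre_s5 train) := by unfold Pre_s5; infer_instance

def pvWitness_s5 : (List (List (String × List Int))) := [[("zs", [1, 2, 2])]]

def Spec_s5 (train : List (List (String × List Int))) (out : Int) : Prop := out = s5_alt train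
instance (train : List (List (String × List Int))) (out : Int) : Decidable (Spec_s5 train out) := by unfold Spec_s5; infer_instance

-- ===== CLAIM (what is proved, stated in full; the proofs are below) =====
def Claim_equal_s5 : Prop := ∀ (train : List (List (String × List Int))), Dom_s5 train → Pre_s5 train → Spec_s5 train (s5 train)

-- ===== LEMMAS AND PROOFS =====

-- the comparison used by PySem's stable reverse sort on count
def pvBef (a b : Int × Int) : Bool := decide (b.2 < a.2)

theorem pv_head?_insertBy (x : Int × Int) (ys : List (Int × Int)) :
    (PySem.List.insertBy pvBef x ys).head? = pvStep ys.head? x := by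
  cases ys with
  | nil => simp [PySem.List.insertBy, pvStep]
  | cons y t =>
    simp only [PySem.List.insertBy, pvBef, pvStep, List.head?_cons]
    by_cases h : y.2 < x.2
    · simp [h]
    · simp [h]

theorem pv_head?_foldl_insertBy (m : List (Int × Int)) (acc : List (Int × Int)) :
    (m.foldl (fun acc x => PySem.List.insertBy pvBef x acc) acc).head? =
      m.foldl pvStep acc.head? := by
  induction m generalizing acc with
  | nil => rfl
  | cons x t ih => simp only [List.foldl_cons, ih, pv_head?_insertBy]

theorem pv_head (m : List (Int × Int)) :
    (PySem.List.sorted m (fun p => p.2) true).head? = m.foldl pvStep none := by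
  rw [PySem.List.sorted_rev_eq_foldl_insertBy]
  exact pv_head?_foldl_insertBy m []

theorem pv_filter_insertBy (P : Int × Int → Bool) (x : Int × Int) (ys : List (Int × Int))
    (hs : ys.Pairwise (fun a b => b.2 ≤ a.2)) :
    (PySem.List.insertBy pvBef x ys).filter P =
      if P x then PySem.List.insertBy pvBef x (ys.filter P) else ys.filter P := by
  induction ys with
  | nil => by_cases hx : P x <;> simp [PySem.List.insertBy, hx]
  | cons y t ih =>
    rcases List.pairwise_cons.mp hs with ⟨hy, ht⟩
    by_cases hxy : pvBef x y = true
    · -- x goes in front of y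
      simp only [PySem.List.insertBy, hxy, if_true]
      by_cases hPy : P y
      · by_cases hx : P x <;>
          simp [hPy, hx, PySem.List.insertBy, hxy]
      · by_cases hx : P x
        · simp only [List.filter_cons, hPy, hx, if_true, if_false, Bool.false_eq_true]
          -- need: x :: t.filter P = insertBy x (t.filter P): every z ∈ t has z.2 ≤ y.2 < x.2
          cases hft : (t.filter P) with
          | nil => simp [PySem.List.insertBy]
          | cons z u =>
            have hz : z ∈ t := List.mem_of_mem_filter (by rw [hft]; exact List.mem_cons_self)
            have : pvBef x z = true := by
              have h1 : z.2 ≤ y.2 := hy z hz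
              have h2 : y.2 < x.2 := of_decide_eq_true hxy
              simp [pvBef]; omega
            simp [PySem.List.insertBy, this]
        · simp [hPy, hx]
    · -- x goes after y
      simp only [PySem.List.insertBy, hxy, if_false, Bool.false_eq_true]
      by_cases hPy : P y
      · by_cases hx : P x <;>
          simp [hPy, hx, ih ht, PySem.List.insertBy, hxy]
      · by_cases hx : P x <;> simp [hPy, hx, ih ht]

theorem pv_filter_sorted (P : Int × Int → Bool) (l : List (Int × Int)) :
    (PySem.List.sorted l (fun p => p.2) true).filter P =
      PySem.List.sorted (l.filter P) (fun p => p.2) true := by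
  induction l using List.reverseRecOn with
  | nil => rfl
  | append_singleton l x ih =>
    have hins : ∀ (m : List (Int × Int)), PySem.List.sorted (m ++ [x]) (fun p => p.2) true =
        PySem.List.insertBy pvBef x (PySem.List.sorted m (fun p => p.2) true) := by
      intro m
      rw [PySem.List.sorted_rev_eq_foldl_insertBy, PySem.List.sorted_rev_eq_foldl_insertBy,
        List.foldl_append]
      rfl
    rw [hins, pv_filter_insertBy P x _ (PySem.List.sorted_pairwise_rev l (fun p => p.2)), ih]
    by_cases hx : P x
    · rw [List.filter_append, show ([x].filter P) = [x] by simp [hx], hins, if_pos hx]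
    · rw [List.filter_append, show ([x].filter P) = ([] : List (Int × Int)) by simp [hx],
        List.append_nil, if_neg hx]

theorem pv_find?_eq_head?_filter (P : Int × Int → Bool) (l : List (Int × Int)) :
    l.find? P = (l.filter P).head? := by
  induction l with
  | nil => rfl
  | cons y t ih =>
    cases h : P y with
    | true => simp [h]
    | false =>
      rw [List.find?_cons_of_neg (by simp [h]), List.filter_cons_of_neg (by simp [h])]
      exact ih

theorem pv_main (last : PySem.Set Int) (items : List (Int × Int)) :
    (match (PySem.List.sorted items (fun p => p.2) true).find?
        (fun p => PySem.Set.contains last p.1) with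
     | some p => p.1
     | none =>
       match PySem.List.sorted items (fun p => p.2) true with
       | p :: _ => p.1
       | [] => 0) =
    (match items.foldl
        (fun st p => (if PySem.Set.contains last p.1 then pvStep st.1 p else st.1, pvStep st.2 p))
        (none, none) with
     | (some q, _) => q.1
     | (none, some q) => q.1
     | (none, none) => (0 : Int)) := by
  rw [PySem.List.foldl_prod_mk
      (f := fun acc p => if PySem.Set.contains last p.1 then pvStep acc p else acc)
      (g := pvStep)]
  rw [PySem.List.foldl_if_eq_foldl_filter (fun p => PySem.Set.contains last p.1) pvStep items none]
  rw [← pv_head, ← pv_head, ← pv_filter_sorted, ← pv_find?_eq_head?_filter]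
  cases hf : (PySem.List.sorted items (fun p => p.2) true).find?
      (fun p => PySem.Set.contains last p.1) with
  | some p => simp
  | none =>
    cases hs : PySem.List.sorted items (fun p => p.2) true with
    | nil => simp
    | cons p t => simp

-- ===== VERDICT (by name: the statement is the Claim_ definition above) =====
theorem s5_spec : Claim_equal_s5 := by
  intro train _ _
  unfold Spec_s5 s5 s5_alt
  exact pv_main (pvLast train) (pvCounter train).items
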